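-- pv_equiv track=rewrite | github.com/pomneii/BplusTree-Project-OODs | Searching/boxbox.py | find_min_weight
-- ===== SOURCE A (Python) =====
-- def can_pack_boxes(weights, k, max_weight):
--     current_sum = 0
--     box_count = 1  # start at the first
--     for w in weights:
--         if current_sum + w <= max_weight:
--             current_sum += w
--         else:
--             box_count += 1
--             if box_count > k:
--                 return False
--             current_sum = w  # push the new one in the box
--     return True
--
-- def find_min_weight(weights, k):
--     # low = max(weight) its the most weight and it will be the least when we put in the box
--     low, high = max(weights), sum(weights)
--     result = high
--
--     while low <= high:
--         mid = (low + high) // 2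
--         if can_pack_boxes(weights, k, mid):
--             result = mid
--             high = mid - 1  # can find min
--         else:
--             low = mid + 1  # set up more weight, can not take all in k boxed
--
--     return result
-- ===== SOURCE B (Python) =====
-- def find_min_weight(weights, k):
--     n = len(weights)
--     boxes = max(k, 1)
--     if boxes > n:
--         boxes = n
--     prefix = [0]
--     best = []
--     total = 0
--     for w in weights:
--         total += w
--         prefix.append(total)
--         best.append(total)       # one box: best[i] = weights[0] + ... + weights[i]
--     for _ in range(boxes - 1):   # allow one more box per round
--         new = [best[0]]
--         for i in range(1, n):
--             b = best[i]
--             for p in range(i):   # last box holds weights[p+1 .. i]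
--                 cand = best[p]
--                 seg = prefix[i + 1] - prefix[p + 1]
--                 if seg > cand:
--                     cand = seg
--                 if cand < b:
--                     b = cand
--             new.append(b)
--         best = new
--     return best[n - 1]
-- ===== Notes on version B (the rewrite author's own statement) =====
-- stated objective: alternative
-- what changed: Replaces binary search on the answer with a greedy feasibility check by a bottom-up dynamic program over prefix sums that computes the minimal achievable maximum box sum directly (best[i] for at most j boxes, one round per extra box).
-- outside the precondition, e.g. on find_min_weight([-1, 6, 5, 2, -7, 9, 5, -7], 2): A returns 10, B returns 7
import Mathlib
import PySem

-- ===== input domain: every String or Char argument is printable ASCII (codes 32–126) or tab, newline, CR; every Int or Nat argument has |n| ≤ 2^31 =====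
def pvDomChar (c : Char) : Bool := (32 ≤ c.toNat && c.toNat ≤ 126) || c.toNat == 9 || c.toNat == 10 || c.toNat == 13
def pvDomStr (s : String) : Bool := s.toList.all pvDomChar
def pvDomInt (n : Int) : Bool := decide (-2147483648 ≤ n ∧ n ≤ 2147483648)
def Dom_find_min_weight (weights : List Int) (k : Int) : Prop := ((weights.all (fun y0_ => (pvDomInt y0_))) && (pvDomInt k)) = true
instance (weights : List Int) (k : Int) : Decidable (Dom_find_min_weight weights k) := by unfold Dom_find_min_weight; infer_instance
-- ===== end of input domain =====

-- B replaces A's binary search on the answer by a direct dynamic program over prefix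
-- sums (alternative algorithm, not claimed faster); equivalence is proved on the
-- inputs admitted by Pre_ below.

-- ===== PORT A =====
-- the for-loop of can_pack_boxes over (current_sum, box_count)
def canPackGo (k maxW : Int) : Int → Int → List Int → Bool
  | _, _, [] => true
  | cur, cnt, w :: ws =>
    if cur + w ≤ maxW then canPackGo k maxW (cur + w) cnt ws
    else if cnt + 1 > k then false
    else canPackGo k maxW w (cnt + 1) ws

def can_pack_boxes (weights : List Int) (k maxW : Int) : Bool :=
  canPackGo k maxW 0 1 weights

-- the while-loop of find_min_weight over (low, high, result)
def bsLoop (weights : List Int) (k : Int) (low high result : Int) : Int :=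
  if h : low ≤ high then
    let mid := PySem.Int.floordiv (low + high) 2
    if can_pack_boxes weights k mid then bsLoop weights k low (mid - 1) mid
    else bsLoop weights k (mid + 1) high result
  else result
termination_by (high + 1 - low).toNat
decreasing_by
  · have hb := PySem.Int.floordiv_two_mid_bounds h; omega
  · have hb := PySem.Int.floordiv_two_mid_bounds h; omega

def find_min_weight (weights : List Int) (k : Int) : Int :=
  match PySem.List.max? weights (fun y => y) with
  | none => 0   -- Python: max([]) raises ValueError; excluded by Pre_
  | some low =>
    let high := weights.sum
    bsLoop weights k low high high

-- ===== PORT B =====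
-- the innermost p-loop of Source B computing the best value for prefix 0..i
def bInner (pre best : List Int) (i : Int) : Int :=
  (PySem.List.pyRange 0 i 1).foldl
    (fun b p =>
      let cand := PySem.List.pyGetD best p 0
      let seg := PySem.List.pyGetD pre (i + 1) 0 - PySem.List.pyGetD pre (p + 1) 0
      let cand := if cand < seg then seg else cand
      if cand < b then cand else b)
    (PySem.List.pyGetD best i 0)

-- one round of Source B's outer loop: allow one more box
def bRound (pre best : List Int) (n : Int) : List Int :=
  (PySem.List.pyRange 1 n 1).foldl (fun new i => new ++ [bInner pre best i])
    [PySem.List.pyGetD best 0 0]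

def find_min_weight_alt (weights : List Int) (k : Int) : Int :=
  let n : Int := weights.length
  let boxes0 := max k 1
  let boxes := if boxes0 > n then n else boxes0
  let st := weights.foldl
    (fun (st : List Int × List Int × Int) w =>
      let t := st.2.2 + w
      (st.1 ++ [t], st.2.1 ++ [t], t)) ([0], [], 0)
  let pre := st.1
  let best := st.2.1
  let bestF := (PySem.List.pyRange 0 (boxes - 1) 1).foldl (fun b _ => bRound pre b n) best
  PySem.List.pyGetD bestF (n - 1) 0

-- ===== PRECONDITION & SPEC =====
-- Pre_ excludes the empty list, on which A raises ValueError (max([])), and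
-- multi-element lists containing a negative weight when more than one box is allowed
-- (k > 1), on which A's greedy feasibility predicate is non-monotone in the capacity
-- so the binary search's return value is an accidental artefact of its probe sequence
-- rather than any specified quantity.
def Pre_find_min_weight (weights : List Int) (k : Int) : Prop :=
  weights ≠ [] ∧ ((∀ w ∈ weights, 0 ≤ w) ∨ k ≤ 1 ∨ weights.length = 1)

instance (weights : List Int) (k : Int) : Decidable (Pre_find_min_weight weights k) := by
  unfold Pre_find_min_weight; infer_instance

def pvWitness_find_min_weight : List Int × Int := ([2, 3, 1, 2], 2)

def Spec_find_min_weight (weights : List Int) (k : Int) (out : Int) : Prop := out = find_min_weight_alt weights k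
instance (weights : List Int) (k : Int) (out : Int) : Decidable (Spec_find_min_weight weights k out) := by unfold Spec_find_min_weight; infer_instance

-- ===== CLAIM (what is proved, stated in full; the proofs are below) =====
def Claim_equal_find_min_weight : Prop := ∀ (weights : List Int) (k : Int), Dom_find_min_weight weights k → Pre_find_min_weight weights k → Spec_find_min_weight weights k (find_min_weight weights k)

-- ===== LEMMAS AND PROOFS =====

-- sum of the first t weights
def pvS (ws : List Int) (t : Nat) : Int := (ws.take t).sum

-- "the first t weights fit into at most K boxes of capacity v" (empty boxes allowed)
def pvFeas (ws : List Int) (K : Nat) (t : Nat) (v : Int) : Prop :=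
  ∃ parts : List (List Int),
    parts.flatten = ws.take t ∧ parts.length ≤ K ∧ ∀ q ∈ parts, q.sum ≤ v

-- the mathematical shape of Source B's inner loop
def pvNext (ws : List Int) (g : Nat → Int) (i : Nat) : Int :=
  (List.range i).foldl
    (fun b p =>
      let cand := g p
      let seg := pvS ws (i + 1) - pvS ws (p + 1)
      let cand := if cand < seg then seg else cand
      if cand < b then cand else b)
    (g i)

-- the mathematical DP: pvDP ws r i = best value for prefix 0..i using at most r+1 boxes
def pvDP (ws : List Int) : Nat → Nat → Int
  | 0 => fun i => pvS ws (i + 1)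
  | r + 1 => fun i => pvNext ws (pvDP ws r) i

theorem pvGo_sound (m k : Int) (ws : List Int) (hle : ∀ w ∈ ws, w ≤ m) :
    ∀ cur cnt, cur ≤ m → canPackGo k m cur cnt ws = true →
    ∃ (r : List Int) (parts : List (List Int)),
      ws = r ++ parts.flatten ∧ cur + r.sum ≤ m ∧ (∀ q ∈ parts, q.sum ≤ m) ∧
      (parts = [] ∨ (cnt + parts.length : Int) ≤ k) := by
  induction ws with
  | nil =>
    intro cur cnt hcur _
    exact ⟨[], [], by simp, by simpa using hcur, by simp, Or.inl rfl⟩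
  | cons w ws ih =>
    intro cur cnt hcur hgo
    simp only [canPackGo] at hgo
    by_cases h1 : cur + w ≤ m
    · rw [if_pos h1] at hgo
      obtain ⟨r, parts, hWs, hSum, hParts, hCnt⟩ :=
        ih (fun x hx => hle x (List.mem_cons_of_mem _ hx)) (cur + w) cnt h1 hgo
      refine ⟨w :: r, parts, by simp [hWs], ?_, hParts, hCnt⟩
      simp only [List.sum_cons]
      omega
    · rw [if_neg h1] at hgo
      by_cases h2 : cnt + 1 > k
      · rw [if_pos h2] at hgo; exact absurd hgo (by simp)
      · rw [if_neg h2] at hgo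
        have hwm : w ≤ m := hle w (List.mem_cons_self ..)
        obtain ⟨r, parts, hWs, hSum, hParts, hCnt⟩ :=
          ih (fun x hx => hle x (List.mem_cons_of_mem _ hx)) w (cnt + 1) hwm hgo
        refine ⟨[], (w :: r) :: parts, by simp [hWs], by simpa using hcur, ?_, ?_⟩
        · intro q hq
          rcases List.mem_cons.mp hq with h | h
          · subst h; simpa using hSum
          · exact hParts q h
        · right
          rcases hCnt with h | h
          · subst h; simp; omega
          · simp only [List.length_cons]
            push_cast at h ⊢
            omega

theorem pvGo_complete (m k : Int) :
    ∀ (parts : List (List Int)) (p : List Int) (cur cnt : Int),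
      (∀ w ∈ p, 0 ≤ w) → (∀ q ∈ parts, (∀ w ∈ q, 0 ≤ w) ∧ q.sum ≤ m) →
      cur + p.sum ≤ m →
      (parts = [] ∨ (cnt + parts.length : Int) ≤ k) →
      canPackGo k m cur cnt (p ++ parts.flatten) = true := by
  intro parts
  induction parts with
  | nil =>
    intro p
    induction p with
    | nil => intro cur cnt _ _ _ _; simp [canPackGo]
    | cons w p' ihp =>
      intro cur cnt hp _ hsum _
      have hp' : ∀ x ∈ p', 0 ≤ x := fun x hx => hp x (List.mem_cons_of_mem _ hx)
      have hs' : 0 ≤ p'.sum := List.sum_nonneg hp'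
      have hcw : cur + w ≤ m := by simp only [List.sum_cons] at hsum; omega
      simp only [List.cons_append, canPackGo, if_pos hcw]
      apply ihp (cur + w) cnt hp' (by simp) ?_ (Or.inl rfl)
      simp only [List.sum_cons] at hsum; omega
  | cons q parts' ihparts =>
    intro p
    induction p with
    | cons w p' ihp =>
      intro cur cnt hp hparts hsum hcnt
      have hp' : ∀ x ∈ p', 0 ≤ x := fun x hx => hp x (List.mem_cons_of_mem _ hx)
      have hq0 : ∀ r ∈ parts', (∀ x ∈ r, 0 ≤ x) ∧ r.sum ≤ m :=
        fun r hr => hparts r (List.mem_cons_of_mem _ hr)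
      have hsq : 0 ≤ (q :: parts').flatten.sum := by
        apply List.sum_nonneg
        intro x hx
        obtain ⟨r, hr, hxr⟩ := List.mem_flatten.mp hx
        exact (hparts r hr).1 x hxr
      have hs' : 0 ≤ p'.sum := List.sum_nonneg hp'
      have hcw : cur + w ≤ m := by simp only [List.sum_cons] at hsum; omega
      simp only [List.cons_append, canPackGo, if_pos hcw]
      apply ihp (cur + w) cnt hp' hparts ?_ hcnt
      simp only [List.sum_cons] at hsum; omega
    | nil =>
      intro cur cnt _ hparts hsum hcnt
      simp only [List.nil_append, List.flatten_cons]
      have hcnt' : (cnt + (parts'.length + 1) : Int) ≤ k := by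
        rcases hcnt with h | h
        · exact absurd h (by simp)
        · simp only [List.length_cons] at h; omega
      have hq := hparts q (List.mem_cons_self ..)
      have hcur : cur ≤ m := by simpa using hsum
      -- walk through the part q, splitting at most once
      have walk : ∀ (q' : List Int) (cur : Int), (∀ x ∈ q', 0 ≤ x) → q'.sum ≤ m →
          cur ≤ m → canPackGo k m cur cnt (q' ++ parts'.flatten) = true := by
        intro q'
        induction q' with
        | nil =>
          intro cur _ _ hcur
          have := ihparts [] cur cnt (by simp)
            (fun r hr => hparts r (List.mem_cons_of_mem _ hr)) (by simpa using hcur)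
            (by
              rcases List.eq_nil_or_concat parts' with h | _
              · exact Or.inl h
              · right; omega)
          simpa using this
        | cons w q'' ihq =>
          intro cur hnn hqs hcur
          have hnn' : ∀ x ∈ q'', 0 ≤ x := fun x hx => hnn x (List.mem_cons_of_mem _ hx)
          have hw : 0 ≤ w := hnn w (List.mem_cons_self ..)
          simp only [List.cons_append, canPackGo]
          by_cases hcw : cur + w ≤ m
          · rw [if_pos hcw]
            apply ihq (cur + w) hnn' ?_ hcw
            simp only [List.sum_cons] at hqs
            have : 0 ≤ q''.sum := List.sum_nonneg hnn'
            omega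
          · rw [if_neg hcw]
            have hk : ¬ (cnt + 1 > k) := by omega
            rw [if_neg hk]
            have := ihparts q'' w (cnt + 1) hnn'
              (fun r hr => hparts r (List.mem_cons_of_mem _ hr))
              (by simp only [List.sum_cons] at hqs; omega)
              (by
                rcases List.eq_nil_or_concat parts' with h | _
                · exact Or.inl h
                · right; omega)
            exact this
      exact walk q cur hq.1 hq.2 hcur

theorem pvCanPack_iff (ws : List Int) (k m : Int) (hne : ws ≠ [])
    (hnn : ∀ w ∈ ws, 0 ≤ w) (hle : ∀ w ∈ ws, w ≤ m) :
    can_pack_boxes ws k m = true ↔ pvFeas ws (max k 1).toNat ws.length m := by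
  constructor
  · intro hgo
    have h0m : (0 : Int) ≤ m := by
      rcases List.exists_mem_of_ne_nil ws hne with ⟨w, hw⟩
      exact le_trans (hnn w hw) (hle w hw)
    obtain ⟨r, parts, hWs, hSum, hParts, hCnt⟩ :=
      pvGo_sound m k ws hle 0 1 h0m hgo
    refine ⟨r :: parts, ?_, ?_, ?_⟩
    · simp [hWs]
    · rcases hCnt with h | h
      · subst h; simp only [List.length_cons, List.length_nil]; omega
      · simp only [List.length_cons]; omega
    · intro q hq
      rcases List.mem_cons.mp hq with h | h
      · subst h; omega
      · exact hParts q h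
  · rintro ⟨parts, hFl, hLen, hSums⟩
    rw [List.take_length] at hFl
    rcases parts with _ | ⟨hd, tl⟩
    · simp at hFl; exact absurd hFl hne
    · have hmem : ∀ x, x ∈ (hd :: tl).flatten → x ∈ ws := by rw [hFl]; exact fun x h => h
      have hgo := pvGo_complete m k tl hd 0 1
        (fun x hx => hnn x (hmem x (List.mem_flatten.mpr ⟨hd, List.mem_cons_self .., hx⟩)))
        (fun q hq =>
          ⟨fun x hx => hnn x (hmem x (List.mem_flatten.mpr ⟨q, List.mem_cons_of_mem _ hq, hx⟩)),
           hSums q (List.mem_cons_of_mem _ hq)⟩)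
        (by simpa using hSums hd (List.mem_cons_self ..))
        (by
          rcases List.eq_nil_or_concat tl with h | ⟨l, a, hl⟩
          · exact Or.inl h
          · right
            have : 1 ≤ tl.length := by subst hl; simp
            simp only [List.length_cons] at hLen
            omega)
      unfold can_pack_boxes
      rw [← hFl]
      simpa using hgo

theorem pvFeas_mono_v (ws : List Int) (K t : Nat) (v v' : Int) (h : v ≤ v')
    (hf : pvFeas ws K t v) : pvFeas ws K t v' := by
  obtain ⟨parts, h1, h2, h3⟩ := hf
  exact ⟨parts, h1, h2, fun q hq => le_trans (h3 q hq) h⟩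

theorem pvFeas_mono_K (ws : List Int) (K K' t : Nat) (h : K ≤ K') (v : Int)
    (hf : pvFeas ws K t v) : pvFeas ws K' t v := by
  obtain ⟨parts, h1, h2, h3⟩ := hf
  exact ⟨parts, h1, le_trans h2 h, h3⟩

-- a partition into nonempty parts has at most as many parts as elements
theorem pvLen_le_flatten (parts : List (List Int)) (h : ∀ q ∈ parts, q ≠ []) :
    parts.length ≤ parts.flatten.length := by
  induction parts with
  | nil => simp
  | cons q t ih =>
    have hq : q ≠ [] := h q (List.mem_cons_self ..)
    have ht := ih (fun q hq => h q (List.mem_cons_of_mem _ hq))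
    have : 1 ≤ q.length := List.length_pos_iff.mpr hq
    simp only [List.length_cons, List.flatten_cons, List.length_append]
    omega

theorem pvFeas_min_n (ws : List Int) (K : Nat) (v : Int)
    (hf : pvFeas ws K ws.length v) : pvFeas ws (min K ws.length) ws.length v := by
  obtain ⟨parts, h1, h2, h3⟩ := hf
  refine ⟨parts.filter (fun q => !q.isEmpty), ?_, ?_, ?_⟩
  · rw [List.flatten_filter_not_isEmpty, h1]
  · have hlen : (parts.filter (fun q => !q.isEmpty)).length ≤ parts.length :=
      List.length_filter_le _ _
    have hnn : ∀ q ∈ parts.filter (fun q => !q.isEmpty), q ≠ [] := by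
      intro q hq
      have := List.of_mem_filter hq
      simpa [List.isEmpty_iff] using this
    have := pvLen_le_flatten _ hnn
    rw [List.flatten_filter_not_isEmpty, h1] at this
    simp only [List.take_length] at this ⊢
    omega
  · intro q hq
    exact h3 q (List.mem_of_mem_filter hq)

theorem pvFoldMin_le_init (c : Nat → Int) (l : List Nat) (a : Int) :
    l.foldl (fun b p => if c p < b then c p else b) a ≤ a := by
  induction l generalizing a with
  | nil => simp
  | cons x t ih =>
    simp only [List.foldl_cons]
    have h2 : (if c x < a then c x else a) ≤ a := by split_ifs <;> omega
    exact le_trans (ih _) h2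

theorem pvFoldMin_le_mem (c : Nat → Int) (l : List Nat) (a : Int) (p : Nat) (hp : p ∈ l) :
    l.foldl (fun b p => if c p < b then c p else b) a ≤ c p := by
  induction l generalizing a with
  | nil => simp at hp
  | cons x t ih =>
    simp only [List.foldl_cons]
    rcases List.mem_cons.mp hp with h | h
    · subst h
      have h1 := pvFoldMin_le_init c t (if c p < a then c p else a)
      have h2 : (if c p < a then c p else a) ≤ c p := by split_ifs <;> omega
      exact le_trans h1 h2
    · exact ih _ h

theorem pvFoldMin_cases (c : Nat → Int) (l : List Nat) (a : Int) :
    l.foldl (fun b p => if c p < b then c p else b) a = a ∨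
      ∃ p ∈ l, l.foldl (fun b p => if c p < b then c p else b) a = c p := by
  induction l generalizing a with
  | nil => exact Or.inl rfl
  | cons x t ih =>
    simp only [List.foldl_cons]
    rcases ih (if c x < a then c x else a) with h | ⟨p, hp, hEq⟩
    · by_cases hx : c x < a
      · rw [if_pos hx] at h ⊢
        exact Or.inr ⟨x, List.mem_cons_self .., h⟩
      · rw [if_neg hx] at h ⊢
        exact Or.inl h
    · exact Or.inr ⟨p, List.mem_cons_of_mem _ hp, hEq⟩

theorem pvDP_feas (ws : List Int) (r i : Nat) :
    pvFeas ws (r + 1) (i + 1) (pvDP ws r i) := by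
  induction r generalizing i with
  | zero =>
    exact ⟨[ws.take (i + 1)], by simp, by simp, by simp [pvDP, pvS]⟩
  | succ r ih =>
    have hdp : pvDP ws (r + 1) i =
        (List.range i).foldl
          (fun b p =>
            if (if pvDP ws r p < pvS ws (i + 1) - pvS ws (p + 1) then
                  pvS ws (i + 1) - pvS ws (p + 1) else pvDP ws r p) < b then
              (if pvDP ws r p < pvS ws (i + 1) - pvS ws (p + 1) then
                  pvS ws (i + 1) - pvS ws (p + 1) else pvDP ws r p)
            else b)
          (pvDP ws r i) := rfl
    rcases pvFoldMin_cases
        (fun p => if pvDP ws r p < pvS ws (i + 1) - pvS ws (p + 1) then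
            pvS ws (i + 1) - pvS ws (p + 1) else pvDP ws r p)
        (List.range i) (pvDP ws r i) with hE | ⟨p, hp, hE⟩
    · rw [hdp, hE]
      exact pvFeas_mono_K ws (r + 1) (r + 2) (i + 1) (by omega) _ (ih i)
    · rw [hdp, hE]
      have hpi : p < i := List.mem_range.mp hp
      obtain ⟨parts, hFl, hLen, hSums⟩ := ih p
      have hsplit : i + 1 = (p + 1) + (i - p) := by omega
      have hseg : pvS ws (i + 1) = pvS ws (p + 1) + ((ws.drop (p + 1)).take (i - p)).sum := by
        rw [pvS, hsplit, List.take_add, List.sum_append]; rfl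
      refine ⟨parts ++ [(ws.drop (p + 1)).take (i - p)], ?_, ?_, ?_⟩
      · rw [List.flatten_append, hFl]
        simp only [List.flatten_cons, List.flatten_nil, List.append_nil]
        conv_rhs => rw [hsplit, List.take_add]
      · simp only [List.length_append, List.length_cons, List.length_nil]
        omega
      · intro q hq
        rcases List.mem_append.mp hq with h | h
        · have := hSums q h
          split_ifs <;> omega
        · simp only [List.mem_cons, List.not_mem_nil, or_false] at h
          subst h
          split_ifs <;> omega

theorem pvDP_opt (ws : List Int) : ∀ (r i : Nat), i < ws.length → ∀ v : Int,
    pvFeas ws (r + 1) (i + 1) v → pvDP ws r i ≤ v := by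
  intro r
  induction r with
  | zero =>
    intro i hi v hf
    obtain ⟨parts, hFl, hLen, hSums⟩ := hf
    rcases parts with _ | ⟨q, _ | ⟨q2, t⟩⟩
    · have := congrArg List.length hFl
      simp only [List.flatten_nil, List.length_nil, List.length_take] at this
      omega
    · simp only [List.flatten_cons, List.flatten_nil, List.append_nil] at hFl
      have := hSums q (List.mem_cons_self ..)
      rw [hFl] at this
      simpa [pvDP, pvS] using this
    · simp at hLen
  | succ r ih =>
    intro i hi v hf
    obtain ⟨parts, hFl, hLen, hSums⟩ := hf
    have hdp : pvDP ws (r + 1) i =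
        (List.range i).foldl
          (fun b p =>
            if (if pvDP ws r p < pvS ws (i + 1) - pvS ws (p + 1) then
                  pvS ws (i + 1) - pvS ws (p + 1) else pvDP ws r p) < b then
              (if pvDP ws r p < pvS ws (i + 1) - pvS ws (p + 1) then
                  pvS ws (i + 1) - pvS ws (p + 1) else pvDP ws r p)
            else b)
          (pvDP ws r i) := rfl
    rcases List.eq_nil_or_concat parts with rfl | ⟨init, q, rfl⟩
    · have := congrArg List.length hFl
      simp only [List.flatten_nil, List.length_nil, List.length_take] at this
      omega
    · simp only [List.concat_eq_append] at hFl hLen hSums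
      rw [List.flatten_append] at hFl
      simp only [List.flatten_cons, List.flatten_nil, List.append_nil] at hFl
      by_cases hq : q = []
      · subst hq
        rw [List.append_nil] at hFl
        have hFeas : pvFeas ws (r + 1) (i + 1) v := by
          refine ⟨init, hFl, ?_, fun q' hq' => hSums q' (List.mem_append_left _ hq')⟩
          simp only [List.length_append, List.length_cons, List.length_nil] at hLen
          omega
        have h1 := ih i hi v hFeas
        rw [hdp]
        exact le_trans (pvFoldMin_le_init _ _ _) h1
      · have hlenq : 1 ≤ q.length := List.length_pos_iff.mpr hq
        have hlt : init.flatten.length + q.length = i + 1 := by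
          have := congrArg List.length hFl
          simp only [List.length_append, List.length_take] at this
          omega
        by_cases hL : q.length = i + 1
        · have hfl0 : init.flatten = [] := by
            have : init.flatten.length = 0 := by omega
            exact List.eq_nil_of_length_eq_zero this
          rw [hfl0, List.nil_append] at hFl
          have hqv : pvS ws (i + 1) ≤ v := by
            have := hSums q (List.mem_append_right _ (List.mem_cons_self ..))
            rw [hFl] at this
            simpa [pvS] using this
          have h1 := ih i hi (pvS ws (i + 1))
            ⟨[ws.take (i + 1)], by simp, by simp, by simp [pvS]⟩
          rw [hdp]
          exact le_trans (le_trans (pvFoldMin_le_init _ _ _) h1) hqv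
        · have hp : i - q.length < i := by omega
          set p := i - q.length with hpdef
          have hp1 : p + 1 = i + 1 - q.length := by omega
          have hfl : init.flatten = ws.take (p + 1) := by
            have h1 : (init.flatten ++ q).take init.flatten.length = init.flatten :=
              List.take_left ..
            rw [hFl] at h1
            rw [← h1, List.take_take]
            congr 1
            omega
          have hFeasP : pvFeas ws (r + 1) (p + 1) v := by
            refine ⟨init, hfl, ?_, fun q' hq' => hSums q' (List.mem_append_left _ hq')⟩
            simp only [List.length_append, List.length_cons, List.length_nil] at hLen
            omega
          have h1 := ih p (by omega) v hFeasP
          have hqsum : q.sum = pvS ws (i + 1) - pvS ws (p + 1) := by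
            have h2 := congrArg List.sum hFl
            rw [List.sum_append, hfl] at h2
            simp only [pvS]
            omega
          have hqv : q.sum ≤ v := hSums q (List.mem_append_right _ (List.mem_cons_self ..))
          rw [hdp]
          have h3 := pvFoldMin_le_mem
            (fun p => if pvDP ws r p < pvS ws (i + 1) - pvS ws (p + 1) then
                pvS ws (i + 1) - pvS ws (p + 1) else pvDP ws r p)
            (List.range i) (pvDP ws r i) p (List.mem_range.mpr hp)
          refine le_trans h3 ?_
          simp only
          split_ifs <;> omega

theorem pvS_cons (w : Int) (ws : List Int) (j : Nat) :
    pvS (w :: ws) (j + 1) = w + pvS ws j := by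
  simp [pvS]

theorem pvRangeMapShift (f : Nat → Int) (n : Nat) :
    f 0 :: (List.range n).map (fun j => f (j + 1)) = (List.range (n + 1)).map f := by
  rw [List.range_succ_eq_map, List.map_cons, List.map_map]
  rfl

theorem pvBuild (ws : List Int) : ∀ (pre best : List Int) (t : Int),
    ws.foldl (fun (st : List Int × List Int × Int) w =>
        let t := st.2.2 + w
        (st.1 ++ [t], st.2.1 ++ [t], t)) (pre, best, t) =
      (pre ++ (List.range ws.length).map (fun j => t + pvS ws (j + 1)),
       best ++ (List.range ws.length).map (fun j => t + pvS ws (j + 1)),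
       t + ws.sum) := by
  induction ws with
  | nil => intro pre best t; simp [pvS]
  | cons w ws ih =>
    intro pre best t
    simp only [List.foldl_cons]
    rw [ih]
    have hfun : (fun j => t + pvS (w :: ws) (j + 1)) ∘ Nat.succ
        = fun j => (t + w) + pvS ws (j + 1) := by
      funext j
      simp only [Function.comp_apply, Nat.succ_eq_add_one]
      rw [show j + 1 + 1 = (j + 1) + 1 from rfl, pvS_cons]
      ring
    have hmap : (List.range (ws.length + 1)).map (fun j => t + pvS (w :: ws) (j + 1))
        = (t + w) :: (List.range ws.length).map (fun j => (t + w) + pvS ws (j + 1)) := by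
      rw [List.range_succ_eq_map, List.map_cons, List.map_map, hfun]
      congr 1
      simp [pvS]
    refine Prod.ext ?_ (Prod.ext ?_ ?_) <;>
      simp only [List.length_cons, List.sum_cons, hmap] <;>
      [skip; skip; ring] <;>
      rw [List.append_assoc] <;> rfl

theorem pvInner_eq (ws : List Int) (g : Nat → Int) (nN iN : Nat) (hi : iN < nN) :
    bInner ((List.range (nN + 1)).map (pvS ws)) ((List.range nN).map g) (iN : Int)
      = pvNext ws g iN := by
  unfold bInner pvNext
  rw [PySem.List.pyRange_one]
  simp only [Int.sub_zero, Int.toNat_natCast, zero_add, List.foldl_map]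
  rw [PySem.List.pyGetD_natCast, PySem.List.getD_map_range g nN iN 0 hi]
  apply PySem.List.foldl_congr_mem
  intro b p hp
  have hpN : p < iN := List.mem_range.mp hp
  rw [PySem.List.pyGetD_natCast, PySem.List.getD_map_range g nN p 0 (by omega)]
  rw [show ((iN : Int) + 1) = ((iN + 1 : Nat) : Int) by push_cast; ring,
      show ((p : Int) + 1) = ((p + 1 : Nat) : Int) by push_cast; ring]
  rw [PySem.List.pyGetD_natCast, PySem.List.pyGetD_natCast,
      PySem.List.getD_map_range (pvS ws) (nN + 1) (iN + 1) 0 (by omega),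
      PySem.List.getD_map_range (pvS ws) (nN + 1) (p + 1) 0 (by omega)]

theorem pvRound_eq (ws : List Int) (g : Nat → Int) (nN : Nat) (hn : 1 ≤ nN) :
    bRound ((List.range (nN + 1)).map (pvS ws)) ((List.range nN).map g) (nN : Int)
      = (List.range nN).map (pvNext ws g) := by
  unfold bRound
  rw [PySem.List.foldl_append_singleton_eq_map]
  rw [PySem.List.pyGetD_zero, PySem.List.getD_map_range g nN 0 0 (by omega)]
  rw [PySem.List.pyRange_one]
  rw [List.map_map]
  have hl : ((nN : Int) - 1).toNat = nN - 1 := by omega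
  rw [hl]
  have hfun : ∀ kk ∈ List.range (nN - 1),
      (bInner ((List.range (nN + 1)).map (pvS ws)) ((List.range nN).map g) ∘
        fun k => (1 : Int) + ↑k) kk = pvNext ws g (kk + 1) := by
    intro kk hk
    have hkk : kk < nN - 1 := List.mem_range.mp hk
    simp only [Function.comp_apply]
    rw [show ((1 : Int) + (kk : Int)) = ((kk + 1 : Nat) : Int) by push_cast; ring]
    exact pvInner_eq ws g nN (kk + 1) (by omega)
  rw [List.map_congr_left hfun]
  have h0 : pvNext ws g 0 = g 0 := by simp [pvNext]
  rw [show [g 0] = [pvNext ws g 0] by rw [h0]]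
  rw [List.singleton_append]
  rw [show (List.range (nN - 1)).map (fun kk => pvNext ws g (kk + 1))
      = (List.range (nN - 1)).map (fun kk => pvNext ws g (kk + 1)) from rfl]
  rw [pvRangeMapShift (pvNext ws g) (nN - 1), Nat.sub_add_cancel hn]

theorem pvFoldConst {α β : Type} (f : α → α) :
    ∀ (l : List β) (b : α), l.foldl (fun acc _ => f acc) b = f^[l.length] b := by
  intro l
  induction l with
  | nil => intro b; rfl
  | cons x t ih =>
    intro b
    simp only [List.foldl_cons, List.length_cons]
    rw [ih, Function.iterate_succ_apply]

theorem pvIter_eq (ws : List Int) (nN : Nat) (hn : 1 ≤ nN) :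
    ∀ (r : Nat),
      (fun b => bRound ((List.range (nN + 1)).map (pvS ws)) b (nN : Int))^[r]
          ((List.range nN).map (fun j => pvS ws (j + 1)))
        = (List.range nN).map (pvDP ws r) := by
  intro r
  induction r with
  | zero => rfl
  | succ r ih =>
    rw [Function.iterate_succ_apply', ih]
    exact pvRound_eq ws (pvDP ws r) nN hn

theorem pvAlt_eq (ws : List Int) (k : Int) (hne : ws ≠ []) :
    find_min_weight_alt ws k =
      pvDP ws ((min (max k 1) (ws.length : Int) - 1).toNat) (ws.length - 1) := by
  have hn : 1 ≤ ws.length := List.length_pos_iff.mpr hne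
  unfold find_min_weight_alt
  rw [pvBuild ws [0] [] 0]
  simp only [zero_add, List.nil_append]
  have hbox : (if max k 1 > (ws.length : Int) then (ws.length : Int) else max k 1)
      = min (max k 1) (ws.length : Int) := by omega
  rw [hbox]
  have hpre : ([0] ++ (List.range ws.length).map fun j => pvS ws (j + 1))
      = (List.range (ws.length + 1)).map (pvS ws) := by
    rw [show ([0] : List Int) = [pvS ws 0] by simp [pvS], List.singleton_append]
    exact pvRangeMapShift (pvS ws) ws.length
  rw [hpre]
  rw [pvFoldConst (fun b => bRound ((List.range (ws.length + 1)).map (pvS ws)) b (ws.length : Int))]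
  rw [PySem.List.length_pyRange_one]
  rw [pvIter_eq ws ws.length hn]
  rw [show ((ws.length : Int) - 1) = ((ws.length - 1 : Nat) : Int) by omega]
  rw [PySem.List.pyGetD_natCast,
      PySem.List.getD_map_range _ ws.length (ws.length - 1) 0 (by omega)]
  congr 2
  omega

theorem pvBs_eq (ws : List Int) (k mx dp : Int)
    (hiff : ∀ m, mx ≤ m → (can_pack_boxes ws k m = true ↔ dp ≤ m)) :
    ∀ (N : Nat) (low high res : Int), (high + 1 - low).toNat ≤ N →
      mx ≤ low → low ≤ dp → dp ≤ high + 1 → (dp ≤ high ∨ res = dp) →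
      bsLoop ws k low high res = dp := by
  intro N
  induction N with
  | zero =>
    intro low high res hN hmx hlow hhigh hres
    have hlh : ¬ (low ≤ high) := by omega
    rw [bsLoop, dif_neg hlh]
    rcases hres with h | h
    · omega
    · exact h
  | succ N ih =>
    intro low high res hN hmx hlow hhigh hres
    rw [bsLoop]
    by_cases hlh : low ≤ high
    · simp only [dif_pos hlh]
      have hb := PySem.Int.floordiv_two_mid_bounds hlh
      by_cases hc : dp ≤ PySem.Int.floordiv (low + high) 2
      · rw [if_pos ((hiff _ (by omega)).mpr hc)]
        exact ih low (PySem.Int.floordiv (low + high) 2 - 1)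
          (PySem.Int.floordiv (low + high) 2) (by omega) hmx hlow (by omega) (by omega)
      · have hcp : ¬ (can_pack_boxes ws k (PySem.Int.floordiv (low + high) 2) = true) :=
          fun h => hc ((hiff _ (by omega)).mp h)
        rw [if_neg hcp]
        exact ih (PySem.Int.floordiv (low + high) 2 + 1) high res (by omega) (by omega)
          (by omega) (by omega) hres
    · rw [dif_neg hlh]
      rcases hres with h | h
      · omega
      · exact h

theorem pvBs_none (ws : List Int) (k : Int) :
    ∀ (N : Nat) (low high res : Int), (high + 1 - low).toNat ≤ N →
      (∀ m, low ≤ m → m ≤ high → can_pack_boxes ws k m = false) →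
      bsLoop ws k low high res = res := by
  intro N
  induction N with
  | zero =>
    intro low high res hN _
    rw [bsLoop, dif_neg (by omega : ¬ (low ≤ high))]
  | succ N ih =>
    intro low high res hN hfalse
    rw [bsLoop]
    by_cases hlh : low ≤ high
    · simp only [dif_pos hlh]
      have hb := PySem.Int.floordiv_two_mid_bounds hlh
      rw [hfalse _ hb.1 hb.2]
      simp only [Bool.false_eq_true, if_false]
      exact ih _ high res (by omega) (fun m h1 h2 => hfalse m (by omega) h2)
    · rw [dif_neg hlh]

-- with k ≤ 1 the greedy loop never may split: it succeeds iff every prefix sum fits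
theorem pvGo_k1 (m k : Int) (hk : k ≤ 1) :
    ∀ (ws : List Int) (cur : Int), canPackGo k m cur 1 ws = true ↔
      ∀ t : Nat, 1 ≤ t → t ≤ ws.length → cur + (ws.take t).sum ≤ m := by
  intro ws
  induction ws with
  | nil =>
    intro cur
    constructor
    · intro _ t ht1 ht2
      simp only [List.length_nil] at ht2
      omega
    · intro _; rfl
  | cons w ws ih =>
    intro cur
    simp only [canPackGo]
    by_cases h1 : cur + w ≤ m
    · rw [if_pos h1, ih (cur + w)]
      constructor
      · intro h t ht1 ht2
        cases t with
        | zero => omega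
        | succ t' =>
          simp only [List.take_succ_cons, List.sum_cons]
          cases Nat.eq_zero_or_pos t' with
          | inl h0 => subst h0; simpa using h1
          | inr hpos =>
            have := h t' hpos (by simpa using ht2)
            omega
      · intro h t ht1 ht2
        have := h (t + 1) (by omega) (by simpa using ht2)
        simp only [List.take_succ_cons, List.sum_cons] at this
        omega
    · rw [if_neg h1, if_pos (by omega : (1 : Int) + 1 > k)]
      constructor
      · intro hh; exact absurd hh (by simp)
      · intro h
        have := h 1 le_rfl (by simp)
        simp only [List.take_succ_cons, List.take_zero, List.sum_cons, List.sum_nil,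
          add_zero] at this
        omega

-- ===== VERDICT (by name: the statement is the Claim_ definition above) =====
theorem find_min_weight_spec : Claim_equal_find_min_weight := by
  intro ws k _ hpre
  obtain ⟨hne, hcase⟩ := hpre
  unfold Spec_find_min_weight
  rcases hmax : PySem.List.max? ws (fun y => y) with _ | mx
  · rw [PySem.List.max?_eq_none_iff] at hmax
    exact absurd hmax hne
  · have hmem := PySem.List.max?_mem hmax
    have hmaxle : ∀ y ∈ ws, y ≤ mx := PySem.List.max?_isMax hmax
    have hn1 : 1 ≤ ws.length := List.length_pos_iff.mpr hne
    have halt := pvAlt_eq ws k hne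
    set R := (min (max k 1) (ws.length : Int) - 1).toNat with hR
    set dp := pvDP ws R (ws.length - 1) with hdp
    rcases hcase with hnn | hk1 | hlen1
    · -- all weights nonnegative: both sides compute the optimal min-max partition value
      have hR1 : (R : Int) + 1 = min (max k 1) (ws.length : Int) := by omega
      have hfeas : pvFeas ws (R + 1) ws.length dp := by
        have := pvDP_feas ws R (ws.length - 1)
        rwa [Nat.sub_add_cancel hn1] at this
      have hopt : ∀ v, pvFeas ws (R + 1) ws.length v → dp ≤ v := by
        intro v hv
        exact pvDP_opt ws R (ws.length - 1) (by omega) v (by rwa [Nat.sub_add_cancel hn1])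
      have hbridge : ∀ v, pvFeas ws (max k 1).toNat ws.length v ↔ pvFeas ws (R + 1) ws.length v := by
        intro v
        constructor
        · intro h
          have h2 := pvFeas_min_n ws (max k 1).toNat v h
          have h3 : min (max k 1).toNat ws.length = R + 1 := by omega
          rwa [h3] at h2
        · intro h
          exact pvFeas_mono_K ws (R + 1) (max k 1).toNat ws.length (by omega) v h
      have hiff : ∀ m, mx ≤ m → (can_pack_boxes ws k m = true ↔ dp ≤ m) := by
        intro m hm
        rw [pvCanPack_iff ws k m hne hnn (fun w hw => le_trans (hmaxle w hw) hm)]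
        constructor
        · intro h
          exact hopt m ((hbridge m).mp h)
        · intro h
          exact (hbridge m).mpr (pvFeas_mono_v ws (R + 1) ws.length dp m h hfeas)
      have hdple : dp ≤ ws.sum := by
        apply hopt
        refine ⟨[ws], by simp, ?_, by simp⟩
        simp only [List.length_cons, List.length_nil]
        omega
      have hmxdp : mx ≤ dp := by
        obtain ⟨parts, hFl, hLen, hSums⟩ := hfeas
        rw [List.take_length] at hFl
        have hmemfl : mx ∈ parts.flatten := by rw [hFl]; exact hmem
        obtain ⟨q, hq, hmq⟩ := List.mem_flatten.mp hmemfl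
        have hqnn : ∀ x ∈ q, (0 : Int) ≤ x := by
          intro x hx
          exact hnn x (by rw [← hFl]; exact List.mem_flatten.mpr ⟨q, hq, hx⟩)
        exact le_trans (List.single_le_sum hqnn mx hmq) (hSums q hq)
      have hbs := pvBs_eq ws k mx dp hiff (ws.sum + 1 - mx).toNat mx ws.sum ws.sum
        le_rfl le_rfl hmxdp (by omega) (Or.inl hdple)
      unfold find_min_weight
      rw [hmax, halt]
      exact hbs
    · -- k ≤ 1: a single box is forced, both sides return the total sum
      have hR0 : R = 0 := by omega
      have hdpS : dp = ws.sum := by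
        rw [hdp, hR0]
        show pvS ws (ws.length - 1 + 1) = ws.sum
        rw [Nat.sub_add_cancel hn1]
        simp [pvS]
      rw [halt, hdpS]
      unfold find_min_weight
      rw [hmax]
      show bsLoop ws k mx ws.sum ws.sum = ws.sum
      by_cases hmxS : mx ≤ ws.sum
      · by_cases hall : ∀ t : Nat, 1 ≤ t → t ≤ ws.length → pvS ws t ≤ ws.sum
        · refine pvBs_eq ws k mx ws.sum ?_ (ws.sum + 1 - mx).toNat mx ws.sum ws.sum
            le_rfl le_rfl hmxS (by omega) (Or.inl le_rfl)
          intro m hm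
          unfold can_pack_boxes
          rw [pvGo_k1 m k hk1 ws 0]
          constructor
          · intro h
            have := h ws.length hn1 le_rfl
            rw [List.take_length] at this
            omega
          · intro h t ht1 ht2
            have := hall t ht1 ht2
            simp only [pvS] at this
            omega
        · push_neg at hall
          obtain ⟨t0, ht1, ht2, hgt⟩ := hall
          apply pvBs_none ws k (ws.sum + 1 - mx).toNat mx ws.sum ws.sum le_rfl
          intro m hm1 hm2
          cases hb : can_pack_boxes ws k m with
          | false => rfl
          | true =>
            exfalso
            unfold can_pack_boxes at hb
            rw [pvGo_k1 m k hk1 ws 0] at hb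
            have := hb t0 ht1 ht2
            simp only [pvS] at hgt
            omega
      · rw [bsLoop, dif_neg (by omega : ¬ (mx ≤ ws.sum))]
    · -- a single weight: both sides return it
      obtain ⟨w, rfl⟩ : ∃ w, ws = [w] := by
        rcases ws with _ | ⟨w, _ | _⟩ <;> simp_all
      have hmx : mx = w := by simpa using hmem
      have hR0 : R = 0 := by
        have h1 : (([w] : List Int).length : Int) = 1 := by simp
        omega
      have hdpw : dp = w := by
        rw [hdp, hR0]
        show pvS [w] (([w] : List Int).length - 1 + 1) = w
        simp [pvS]
      rw [halt, hdpw]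
      unfold find_min_weight
      rw [hmax]
      show bsLoop [w] k mx ([w] : List Int).sum ([w] : List Int).sum = w
      have hsum : ([w] : List Int).sum = w := by simp
      rw [hsum]
      have hiff1 : ∀ m, mx ≤ m → (can_pack_boxes [w] k m = true ↔ w ≤ m) := by
        intro m hm
        constructor
        · intro _; omega
        · intro _
          show canPackGo k m 0 1 [w] = true
          simp only [canPackGo]
          rw [if_pos (by omega : (0 : Int) + w ≤ m)]
      exact pvBs_eq [w] k mx w hiff1 (w + 1 - mx).toNat mx w w le_rfl le_rfl
        (by omega) (by omega) (Or.inl (by omega))
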